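-- pv_equiv track=rewrite | github.com/ramonzeraa/teste_crypto | src/analysis/market_analysis.py | consolidate_signals
-- ===== SOURCE A (Python) =====
-- from typing import Dict, List, Optional
--
-- def consolidate_signals(signals: List[str]) -> str:
--     """Consolida sinais em uma única recomendação"""
--     try:
--         bullish_signals = len([s for s in signals if 'UP' in s or 'OVERSOLD' in s])
--         bearish_signals = len([s for s in signals if 'DOWN' in s or 'OVERBOUGHT' in s])
--
--         if bullish_signals > bearish_signals:
--             return 'BUY'
--         elif bearish_signals > bullish_signals:
--             return 'SELL'
--         return 'NEUTRAL'
--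
--     except Exception as e:
--         raise Exception(f"Erro ao consolidar sinais: {str(e)}")
-- ===== SOURCE B (Python) =====
-- def consolidate_signals(signals):
--     """Consolida sinais em uma única recomendação"""
--     try:
--         def net(xs):
--             # divide and conquer: net bullish-minus-bearish score of xs
--             if not xs:
--                 return 0
--             if len(xs) == 1:
--                 s = xs[0]
--                 bull = 'UP' in s or 'OVERSOLD' in s
--                 bear = 'DOWN' in s or 'OVERBOUGHT' in s
--                 return int(bull) - int(bear)
--             mid = len(xs) // 2
--             return net(xs[:mid]) + net(xs[mid:])
--
--         n = net(signals)
--         if n > 0: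
--             return 'BUY'
--         if n < 0:
--             return 'SELL'
--         return 'NEUTRAL'
--     except Exception as e:
--         raise Exception(f"Erro ao consolidar sinais: {str(e)}")
-- ===== Notes on version B (the rewrite author's own statement) =====
-- stated objective: alternative
-- what changed: Replaces the two list comprehensions and count comparison with a recursive divide-and-conquer helper that splits the list in halves, computes each half's net bullish-minus-bearish score (a single-element base case scores +1/-1/0), sums the halves, and reads the recommendation off the sign; correct because the net score equals bullish count minus bearish count.
import Mathlib
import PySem

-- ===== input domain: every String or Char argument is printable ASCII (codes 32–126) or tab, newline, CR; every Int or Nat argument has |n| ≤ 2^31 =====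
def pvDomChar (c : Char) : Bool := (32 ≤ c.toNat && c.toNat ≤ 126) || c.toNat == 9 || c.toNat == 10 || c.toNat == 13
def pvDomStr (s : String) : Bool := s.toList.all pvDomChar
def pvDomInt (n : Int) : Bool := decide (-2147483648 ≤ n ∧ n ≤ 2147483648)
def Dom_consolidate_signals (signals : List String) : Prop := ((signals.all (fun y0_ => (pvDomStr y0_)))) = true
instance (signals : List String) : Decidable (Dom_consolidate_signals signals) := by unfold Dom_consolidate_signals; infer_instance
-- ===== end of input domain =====

-- B replaces A's two list comprehensions by a divide-and-conquer net score; objective: alternative decomposition, same cost.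

-- ===== PORT A =====
def consolidate_signals (signals : List String) : String :=
  let bullish_signals := (signals.filter (fun s => PySem.Str.isIn "UP" s || PySem.Str.isIn "OVERSOLD" s)).length
  let bearish_signals := (signals.filter (fun s => PySem.Str.isIn "DOWN" s || PySem.Str.isIn "OVERBOUGHT" s)).length
  if bullish_signals > bearish_signals then "BUY"
  else if bearish_signals > bullish_signals then "SELL"
  else "NEUTRAL"

-- ===== PORT B =====
-- Source B's helper net: divide and conquer on halves; Python xs[:mid]/xs[mid:] with
-- 0 ≤ mid ≤ len xs are exactly List.take mid / List.drop mid.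
def pvNet (xs : List String) : Int :=
  match xs with
  | [] => 0
  | [s] =>
    let bull := PySem.Str.isIn "UP" s || PySem.Str.isIn "OVERSOLD" s
    let bear := PySem.Str.isIn "DOWN" s || PySem.Str.isIn "OVERBOUGHT" s
    (if bull then 1 else 0) - (if bear then 1 else 0)
  | a :: b :: rest =>
    let xs' := a :: b :: rest
    let mid := xs'.length / 2
    pvNet (xs'.take mid) + pvNet (xs'.drop mid)
termination_by xs.length
decreasing_by
  · simp only [List.length_take, List.length_cons]
    omega
  · simp only [List.length_drop, List.length_cons]
    omega

def consolidate_signals_alt (signals : List String) : String :=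
  let n := pvNet signals
  if n > 0 then "BUY"
  else if n < 0 then "SELL"
  else "NEUTRAL"

-- ===== PRECONDITION & SPEC =====
def Spec_consolidate_signals (signals : List String) (out : String) : Prop := out = consolidate_signals_alt signals
instance (signals : List String) (out : String) : Decidable (Spec_consolidate_signals signals out) := by unfold Spec_consolidate_signals; infer_instance

-- ===== CLAIM (what is proved, stated in full; the proofs are below) =====
def Claim_equal_consolidate_signals : Prop := ∀ (signals : List String), Dom_consolidate_signals signals → Spec_consolidate_signals signals (consolidate_signals signals)

-- ===== LEMMAS AND PROOFS =====
def pvBull (s : String) : Bool := PySem.Str.isIn "UP" s || PySem.Str.isIn "OVERSOLD" s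
def pvBear (s : String) : Bool := PySem.Str.isIn "DOWN" s || PySem.Str.isIn "OVERBOUGHT" s

theorem pv_net_eq (xs : List String) :
    pvNet xs = ((xs.filter pvBull).length : Int) - ((xs.filter pvBear).length : Int) := by
  induction xs using pvNet.induct with
  | case1 => simp [pvNet]
  | case2 s =>
    simp only [pvNet, List.filter_cons, List.filter_nil]
    show (if pvBull s then (1:Int) else 0) - (if pvBear s then 1 else 0) = _
    by_cases hb : pvBull s <;> by_cases hr : pvBear s <;> simp [hb, hr]
  | case3 a b rest xs2 mid2 ih1 ih2 =>
    rw [pvNet]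
    show pvNet (List.take mid2 xs2) + pvNet (List.drop mid2 xs2) = _
    rw [ih1, ih2]
    have h : List.take mid2 xs2 ++ List.drop mid2 xs2 = a :: b :: rest :=
      List.take_append_drop _ _
    have hfb := congrArg (fun l => ((l.filter pvBull).length : Int)) h
    have hfr := congrArg (fun l => ((l.filter pvBear).length : Int)) h
    simp only [List.filter_append, List.length_append] at hfb hfr
    push_cast at hfb hfr
    omega

-- ===== VERDICT (by name: the statement is the Claim_ definition above) =====
theorem consolidate_signals_spec : Claim_equal_consolidate_signals := by
  unfold Claim_equal_consolidate_signals Spec_consolidate_signals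
  intro signals _
  unfold consolidate_signals consolidate_signals_alt
  have eb : List.filter (fun s => PySem.Str.isIn "UP" s || PySem.Str.isIn "OVERSOLD" s) signals
      = List.filter pvBull signals := rfl
  have er : List.filter (fun s => PySem.Str.isIn "DOWN" s || PySem.Str.isIn "OVERBOUGHT" s) signals
      = List.filter pvBear signals := rfl
  rw [pv_net_eq signals]
  dsimp only
  rw [eb, er]
  split_ifs <;> first | rfl | omega
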